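-- pv_equiv track=rewrite | github.com/TheGreatOleander/The_Great_Discovery | topology_pressure.py | detect_pressure_pairs
-- ===== SOURCE A (Python) =====
-- from collections import defaultdict
--
-- def detect_pressure_pairs(edges):
--
--     neighbors = defaultdict(set)
--
--     for a,b in edges:
--         neighbors[a].add(b)
--         neighbors[b].add(a)
--
--     nodes = list(neighbors.keys())
--     results = []
--
--     for i in range(len(nodes)):
--         for j in range(i+1,len(nodes)):
--
--             a = nodes[i]
--             b = nodes[j]
--
--             if (a,b) in edges or (b,a) in edges:
--                 continue
--
--             shared = neighbors[a].intersection(neighbors[b])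
--
--             if len(shared) >= 2:
--                 results.append((a,b))
--
--     return results
-- ===== SOURCE B (Python) =====
-- def detect_pressure_pairs(edges):
--     # One pass over each node's neighbor pairs with a counter dict, instead of
--     # scanning all node pairs and intersecting sets.
--     neighbors = {}
--     for a, b in edges:
--         neighbors.setdefault(a, set()).add(b)
--         neighbors.setdefault(b, set()).add(a)
--
--     idx = {node: k for k, node in enumerate(neighbors)}
--
--     count = {}
--     for ns in neighbors.values():
--         lst = sorted(ns, key=idx.__getitem__)
--         for i in range(len(lst)):
--             for j in range(i + 1, len(lst)):
--                 key = (lst[i], lst[j])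
--                 count[key] = count.get(key, 0) + 1
--
--     survivors = [p for p, k in count.items()
--                  if k >= 2
--                  and p not in edges and (p[1], p[0]) not in edges]
--     survivors.sort(key=lambda p: (idx[p[0]], idx[p[1]]))
--     return survivors
-- ===== Notes on version B (the rewrite author's own statement) =====
-- stated objective: alternative
-- what changed: Instead of scanning all node pairs and intersecting neighbor sets, B makes one pass over each node's neighbor pairs accumulating a common-neighbor counter dict, then keeps pairs with count >= 2 that are non-adjacent and sorts them by insertion index to reproduce A's nested-loop order.
import Mathlib
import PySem

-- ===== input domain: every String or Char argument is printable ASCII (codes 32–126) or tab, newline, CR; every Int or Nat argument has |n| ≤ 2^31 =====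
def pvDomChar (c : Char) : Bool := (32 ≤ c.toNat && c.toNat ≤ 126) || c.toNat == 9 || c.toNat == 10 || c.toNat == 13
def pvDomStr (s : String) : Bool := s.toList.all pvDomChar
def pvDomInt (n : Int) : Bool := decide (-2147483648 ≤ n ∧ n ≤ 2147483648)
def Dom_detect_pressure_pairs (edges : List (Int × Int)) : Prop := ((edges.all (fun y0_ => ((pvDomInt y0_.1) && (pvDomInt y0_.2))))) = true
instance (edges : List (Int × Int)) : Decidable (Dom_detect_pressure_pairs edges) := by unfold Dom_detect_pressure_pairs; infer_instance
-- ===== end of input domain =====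

-- B replaces A's all-pairs scan with one pass over each node's neighbour pairs
-- (a counter dict of witnessed common neighbours) followed by a filter and an
-- insertion-index sort that reproduces A's nested-loop output order; objective: alternative algorithm.

-- ===== PORT A =====
-- adjacency build shared by both ports: A's defaultdict(set) loop and B's setdefault loop produce the same dict
def pvAddEdge (d : PySem.Dict Int (PySem.Set Int)) (p : Int × Int) : PySem.Dict Int (PySem.Set Int) :=
  let d1 := d.insert p.1 (PySem.Set.add (d.getD p.1 []) p.2)
  d1.insert p.2 (PySem.Set.add (d1.getD p.2 []) p.1)

def pvNbrs (edges : List (Int × Int)) : PySem.Dict Int (PySem.Set Int) :=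
  edges.foldl pvAddEdge PySem.Dict.empty

def detect_pressure_pairs (edges : List (Int × Int)) : List (Int × Int) :=
  let neighbors := pvNbrs edges
  let nodes := neighbors.keys
  (PySem.List.pyRange 0 (nodes.length : Int) 1).foldl (fun results i =>
    (PySem.List.pyRange (i + 1) (nodes.length : Int) 1).foldl (fun results j =>
      let a := PySem.List.pyGetD nodes i 0
      let b := PySem.List.pyGetD nodes j 0
      if edges.contains (a, b) || edges.contains (b, a) then results
      else
        let shared := PySem.Set.inter (neighbors.getD a []) (neighbors.getD b [])
        if 2 ≤ shared.length then results ++ [(a, b)] else results) results) []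

-- ===== PORT B =====
def detect_pressure_pairs_alt (edges : List (Int × Int)) : List (Int × Int) :=
  let neighbors := pvNbrs edges
  let idx : PySem.Dict Int Int :=
    (PySem.List.enumerate neighbors.keys 0).foldl (fun d kv => d.insert kv.2 kv.1) PySem.Dict.empty
  let count : PySem.Dict (Int × Int) Int :=
    neighbors.values.foldl (fun cnt ns =>
      let lst := PySem.List.sorted ns (fun x => idx.getD x 0) false
      (PySem.List.pyRange 0 (lst.length : Int) 1).foldl (fun cnt i =>
        (PySem.List.pyRange (i + 1) (lst.length : Int) 1).foldl (fun cnt j =>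
          let key := (PySem.List.pyGetD lst i 0, PySem.List.pyGetD lst j 0)
          cnt.insert key (cnt.getD key 0 + 1)) cnt) cnt) PySem.Dict.empty
  let survivors := (count.items.filter (fun pc =>
      2 ≤ pc.2 && !(edges.contains pc.1) && !(edges.contains (pc.1.2, pc.1.1)))).map (·.1)
  PySem.List.sorted2 survivors (fun p => idx.getD p.1 0) (fun p => idx.getD p.2 0) false

-- ===== PRECONDITION & SPEC =====
def Spec_detect_pressure_pairs (edges : List (Int × Int)) (out : List (Int × Int)) : Prop := out = detect_pressure_pairs_alt edges
instance (edges : List (Int × Int)) (out : List (Int × Int)) : Decidable (Spec_detect_pressure_pairs edges out) := by unfold Spec_detect_pressure_pairs; infer_instance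

-- ===== CLAIM (what is proved, stated in full; the proofs are below) =====
def Claim_equal_detect_pressure_pairs : Prop := ∀ (edges : List (Int × Int)), Dom_detect_pressure_pairs edges → Spec_detect_pressure_pairs edges (detect_pressure_pairs edges)

-- ===== LEMMAS AND PROOFS =====

-- all ordered pairs (l[i], l[j]) with i < j, in A's nested-loop order
def pvPairs : List Int → List (Int × Int)
  | [] => []
  | a :: t => t.map (fun b => (a, b)) ++ pvPairs t

theorem pvDoubleLoopAux {β : Type} (xs : List Int) (f : β → Int → Int → β) :
    ∀ (n k : Nat) (init : β), k + n = xs.length →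
    (PySem.List.pyRange (k : Int) (xs.length : Int) 1).foldl (fun acc i =>
      (PySem.List.pyRange (i + 1) (xs.length : Int) 1).foldl (fun acc j =>
        f acc (PySem.List.pyGetD xs i 0) (PySem.List.pyGetD xs j 0)) acc) init
    = (pvPairs (xs.drop k)).foldl (fun acc p => f acc p.1 p.2) init := by
  intro n
  induction n with
  | zero =>
    intro k init hk
    rw [PySem.List.pyRange_one_eq_nil (by omega), List.drop_of_length_le (by omega)]
    simp [pvPairs]
  | succ m ih =>
    intro k init hk
    have hklen : k < xs.length := by omega
    rw [PySem.List.pyRange_one_cons (by exact_mod_cast hklen), List.foldl_cons]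
    have hcast : ((k : Int) + 1) = ((k + 1 : Nat) : Int) := by push_cast; ring
    rw [hcast, PySem.List.foldl_pyRange_pyGetD' xs 0
      (f := fun acc b => f acc (PySem.List.pyGetD xs (k : Int) 0) b) init (by positivity)]
    rw [Int.toNat_natCast, ih (k + 1) _ (by omega)]
    rw [List.drop_eq_getElem_cons hklen, pvPairs, List.foldl_append, List.foldl_map]
    congr 1
    apply PySem.List.foldl_congr_mem
    intro acc b _
    rw [PySem.List.pyGetD_natCast, List.getD_eq_getElem _ _ hklen]

theorem pvDoubleLoop {β : Type} (xs : List Int) (f : β → Int → Int → β) (init : β) :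
    (PySem.List.pyRange 0 (xs.length : Int) 1).foldl (fun acc i =>
      (PySem.List.pyRange (i + 1) (xs.length : Int) 1).foldl (fun acc j =>
        f acc (PySem.List.pyGetD xs i 0) (PySem.List.pyGetD xs j 0)) acc) init
    = (pvPairs xs).foldl (fun acc p => f acc p.1 p.2) init := by
  have h := pvDoubleLoopAux xs f xs.length 0 init (by omega)
  simpa using h

theorem pvIdxAux (xs : List Int) :
    ∀ (s : Int) (d : PySem.Dict Int Int) (u : Int), xs.Nodup →
    ((PySem.List.enumerate xs s).foldl (fun d kv => d.insert kv.2 kv.1) d).getD u 0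
    = if u ∈ xs then s + (xs.idxOf u : Int) else d.getD u 0 := by
  induction xs with
  | nil => intro s d u _; simp [PySem.List.enumerate]
  | cons x t ih =>
    intro s d u hnd
    rcases List.nodup_cons.mp hnd with ⟨hx, hndt⟩
    rw [PySem.List.enumerate_cons, List.foldl_cons, ih (s + 1) (d.insert x s) u hndt]
    by_cases hut : u ∈ t
    · have hux : u ≠ x := fun h => hx (h ▸ hut)
      rw [if_pos hut, if_pos (List.mem_cons_of_mem _ hut), List.idxOf_cons_ne _ (Ne.symm hux)]
      push_cast
      ring
    · by_cases hux : u = x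
      · subst hux
        rw [if_neg hut, if_pos List.mem_cons_self, List.idxOf_cons_self,
          PySem.Dict.getD_insert_self]
        simp
      · rw [if_neg hut, if_neg (by simp [hux, hut]), PySem.Dict.getD_insert, if_neg hux]

-- the invariant of the adjacency build: nodup keys and values, symmetry, closure
def pvInv (d : PySem.Dict Int (PySem.Set Int)) : Prop :=
  d.keys.Nodup ∧ (∀ a : Int, (d.getD a ([] : PySem.Set Int)).Nodup) ∧
  (∀ a b : Int, b ∈ d.getD a ([] : PySem.Set Int) ↔ a ∈ d.getD b ([] : PySem.Set Int)) ∧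
  (∀ a b : Int, b ∈ d.getD a ([] : PySem.Set Int) → a ∈ d.keys ∧ b ∈ d.keys)

theorem pvInv_step (d : PySem.Dict Int (PySem.Set Int)) (p : Int × Int) (h : pvInv d) :
    pvInv (pvAddEdge d p) := by
  obtain ⟨hk, hv, hs, hc⟩ := h
  obtain ⟨a, b⟩ := p
  have hDef : pvAddEdge d (a, b)
      = (d.insert a ((d.getD a ([] : PySem.Set Int)).add b)).insert b
        (((d.insert a ((d.getD a ([] : PySem.Set Int)).add b)).getD b ([] : PySem.Set Int)).add a) := rfl
  have hgd : ∀ x : Int, (pvAddEdge d (a, b)).getD x ([] : PySem.Set Int)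
      = if x = b then ((if b = a then (d.getD a ([] : PySem.Set Int)).add b
            else d.getD b ([] : PySem.Set Int)).add a)
        else if x = a then (d.getD a ([] : PySem.Set Int)).add b
        else d.getD x ([] : PySem.Set Int) := by
    intro x
    rw [hDef]
    simp only [PySem.Dict.getD_insert]
  have hmem : ∀ x y : Int, y ∈ (pvAddEdge d (a, b)).getD x ([] : PySem.Set Int)
      ↔ y ∈ d.getD x ([] : PySem.Set Int) ∨ (x = a ∧ y = b) ∨ (x = b ∧ y = a) := by
    intro x y
    rw [hgd x]
    split_ifs with h1 h2 h3
    · subst h1; subst h2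
      simp only [PySem.Set.mem_add]
      tauto
    · subst h1
      simp only [PySem.Set.mem_add]
      tauto
    · subst h3
      simp only [PySem.Set.mem_add]
      tauto
    · tauto
  have hkeys : ∀ x : Int, x ∈ (pvAddEdge d (a, b)).keys ↔ x ∈ d.keys ∨ x = a ∨ x = b := by
    intro x
    rw [hDef]
    simp only [PySem.Dict.mem_keys_insert]
    tauto
  refine ⟨?_, ?_, ?_, ?_⟩
  · rw [hDef]
    exact PySem.Dict.nodup_keys_insert _ _ _ (PySem.Dict.nodup_keys_insert _ _ _ hk)
  · intro x
    rw [hgd x]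
    split_ifs with h1 h2 h3
    · exact PySem.Set.nodup_add _ _ (PySem.Set.nodup_add _ _ (hv a))
    · exact PySem.Set.nodup_add _ _ (hv b)
    · exact PySem.Set.nodup_add _ _ (hv a)
    · exact hv x
  · intro x y
    simp only [hmem]
    rw [hs x y]
    tauto
  · intro x y hy
    rw [hmem] at hy
    simp only [hkeys]
    rcases hy with hy | ⟨rfl, rfl⟩ | ⟨rfl, rfl⟩
    · exact ⟨Or.inl (hc x y hy).1, Or.inl (hc x y hy).2⟩
    · tauto
    · tauto

theorem pvInv_nbrs (edges : List (Int × Int)) : pvInv (pvNbrs edges) := by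
  have hgen : ∀ (l : List (Int × Int)) (d : PySem.Dict Int (PySem.Set Int)),
      pvInv d → pvInv (l.foldl pvAddEdge d) := by
    intro l
    induction l with
    | nil => intro d h; exact h
    | cons e t ih => intro d h; exact ih _ (pvInv_step d e h)
  refine hgen edges PySem.Dict.empty ⟨?_, ?_, ?_, ?_⟩
  · exact PySem.Dict.nodup_keys_empty
  · intro x; rw [PySem.Dict.getD_empty]; exact List.nodup_nil
  · intro x y; rw [PySem.Dict.getD_empty, PySem.Dict.getD_empty]; simp
  · intro x y hy; rw [PySem.Dict.getD_empty] at hy; simp at hy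

theorem pv_mem_pairs {l : List Int} {p : Int × Int} (h : p ∈ pvPairs l) : p.1 ∈ l ∧ p.2 ∈ l := by
  induction l with
  | nil => simp [pvPairs] at h
  | cons a t ih =>
    simp only [pvPairs, List.mem_append, List.mem_map] at h
    rcases h with ⟨b, hb, rfl⟩ | h
    · exact ⟨List.mem_cons_self, List.mem_cons_of_mem _ hb⟩
    · exact ⟨List.mem_cons_of_mem _ (ih h).1, List.mem_cons_of_mem _ (ih h).2⟩

theorem pv_mem_pairs_iff {K : Int → Int} {l : List Int} (hl : l.Pairwise (fun a b => K a < K b))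
    (u v : Int) : (u, v) ∈ pvPairs l ↔ u ∈ l ∧ v ∈ l ∧ K u < K v := by
  induction l with
  | nil => simp [pvPairs]
  | cons a t ih =>
    rcases List.pairwise_cons.mp hl with ⟨ha, ht⟩
    simp only [pvPairs, List.mem_append, List.mem_map, ih ht, List.mem_cons, Prod.mk.injEq]
    constructor
    · rintro (⟨b, hb, rfl, rfl⟩ | ⟨hu, hv, hlt⟩)
      · exact ⟨Or.inl rfl, Or.inr hb, ha _ hb⟩
      · exact ⟨Or.inr hu, Or.inr hv, hlt⟩
    · rintro ⟨hu | hu, hv | hv, hlt⟩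
      · subst hu; subst hv; omega
      · exact Or.inl ⟨v, hv, hu.symm, rfl⟩
      · exact absurd (ha _ hu) (by subst hv; omega)
      · exact Or.inr ⟨hu, hv, hlt⟩

theorem pv_pairs_pairwise {K : Int → Int} {l : List Int} (hl : l.Pairwise (fun a b => K a < K b)) :
    (pvPairs l).Pairwise (fun p q => K p.1 < K q.1 ∨ (K p.1 = K q.1 ∧ K p.2 < K q.2)) := by
  induction l with
  | nil => simp [pvPairs]
  | cons a t ih =>
    rcases List.pairwise_cons.mp hl with ⟨ha, ht⟩
    refine List.pairwise_append.mpr ⟨?_, ih ht, ?_⟩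
    · rw [List.pairwise_map]
      exact ht.imp (fun h => Or.inr ⟨rfl, h⟩)
    · intro p hp q hq
      rcases List.mem_map.mp hp with ⟨b, _, rfl⟩
      exact Or.inl (ha _ (pv_mem_pairs hq).1)

theorem pv_pairs_nodup {K : Int → Int} {l : List Int} (hl : l.Pairwise (fun a b => K a < K b)) :
    (pvPairs l).Nodup := by
  refine (pv_pairs_pairwise hl).imp ?_
  intro p q h heq
  subst heq
  rcases h with h | ⟨_, h⟩ <;> omega

theorem pv_pairs_count {K : Int → Int} {l : List Int} (hl : l.Pairwise (fun a b => K a < K b))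
    (u v : Int) : (pvPairs l).count (u, v) = if u ∈ l ∧ v ∈ l ∧ K u < K v then 1 else 0 := by
  by_cases h : u ∈ l ∧ v ∈ l ∧ K u < K v
  · rw [if_pos h]
    exact List.count_eq_one_of_mem (pv_pairs_nodup hl) ((pv_mem_pairs_iff hl u v).mpr h)
  · rw [if_neg h]
    exact List.count_eq_zero.mpr (fun hm => h ((pv_mem_pairs_iff hl u v).mp hm))

theorem pv_pairwise_strict {K : Int → Int} {l : List Int} (hle : l.Pairwise (fun a b => K a ≤ K b))
    (hnd : l.Nodup) (hinj : ∀ x ∈ l, ∀ y ∈ l, K x = K y → x = y) :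
    l.Pairwise (fun a b => K a < K b) := by
  rw [List.pairwise_iff_getElem] at hle ⊢
  intro i j hi hj hij
  have h1 := hle i j hi hj hij
  rcases lt_or_eq_of_le h1 with h | h
  · exact h
  · exact absurd (hnd.getElem_inj_iff.mp (hinj _ (l.getElem_mem hi) _ (l.getElem_mem hj) h)) (by omega)

theorem pv_sorted2_eq (xs : List (Int × Int)) (k1 k2 : (Int × Int) → Int) :
    PySem.List.sorted2 xs k1 k2 false
    = PySem.List.sorted xs (fun x => toLex (k1 x, k2 x)) false := by
  rw [PySem.List.sorted_eq_foldl_insertBy]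
  show xs.foldl (fun acc x => PySem.List.insertBy
      (fun a b => decide (k1 a < k1 b) || (!decide (k1 b < k1 a) && decide (k2 a < k2 b))) x acc) []
    = _
  have hbf : (fun (a b : Int × Int) => decide (k1 a < k1 b) || (!decide (k1 b < k1 a) && decide (k2 a < k2 b)))
      = (fun a b => decide (toLex (k1 a, k2 a) < toLex (k1 b, k2 b))) := by
    funext a b
    simp only [Prod.Lex.toLex_lt_toLex]
    by_cases h1 : k1 a < k1 b <;> by_cases h2 : k1 b < k1 a <;> by_cases h3 : k2 a < k2 b <;>
      simp [h1, h2, h3] <;> omega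
  rw [hbf]


-- proof-side views of the two programs
def pvIdxD (edges : List (Int × Int)) : PySem.Dict Int Int :=
  (PySem.List.enumerate (pvNbrs edges).keys 0).foldl
    (fun d kv => d.insert kv.2 kv.1) PySem.Dict.empty

def pvK (edges : List (Int × Int)) : Int → Int := fun x => (pvIdxD edges).getD x 0

def pvNbr (edges : List (Int × Int)) (c : Int) : PySem.Set Int :=
  (pvNbrs edges).getD c ([] : PySem.Set Int)

def pvAllKeys (edges : List (Int × Int)) : List (Int × Int) :=
  (pvNbrs edges).values.flatMap (fun ns => pvPairs (PySem.List.sorted ns (pvK edges) false))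

def pvQA (edges : List (Int × Int)) (p : Int × Int) : Bool :=
  !(edges.contains p || edges.contains (p.2, p.1)) &&
    decide (2 ≤ (PySem.Set.inter (pvNbr edges p.1) (pvNbr edges p.2)).length)

def pvQB (edges : List (Int × Int)) (p : Int × Int) : Bool :=
  decide ((2 : Int) ≤ ((pvAllKeys edges).count p : Int)) &&
    !(edges.contains p) && !(edges.contains (p.2, p.1))

theorem pvK_idxOf (edges : List (Int × Int)) (u : Int) (hu : u ∈ (pvNbrs edges).keys) :
    pvK edges u = ((pvNbrs edges).keys.idxOf u : Int) := by
  have hk := (pvInv_nbrs edges).1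
  show ((PySem.List.enumerate (pvNbrs edges).keys 0).foldl
      (fun d kv => d.insert kv.2 kv.1) PySem.Dict.empty).getD u 0 = _
  rw [pvIdxAux (pvNbrs edges).keys 0 PySem.Dict.empty u hk, if_pos hu]
  ring

theorem pvK_inj (edges : List (Int × Int)) (u : Int) (hu : u ∈ (pvNbrs edges).keys)
    (v : Int) (hv : v ∈ (pvNbrs edges).keys) (h : pvK edges u = pvK edges v) : u = v := by
  have hk := (pvInv_nbrs edges).1
  rw [pvK_idxOf edges u hu, pvK_idxOf edges v hv] at h
  have h' : (pvNbrs edges).keys.idxOf u = (pvNbrs edges).keys.idxOf v := by exact_mod_cast h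
  have h1 : (pvNbrs edges).keys.idxOf u < (pvNbrs edges).keys.length :=
    List.idxOf_lt_length_of_mem hu
  have h2 : (pvNbrs edges).keys.idxOf v < (pvNbrs edges).keys.length :=
    List.idxOf_lt_length_of_mem hv
  rw [← List.getElem_idxOf h1, ← List.getElem_idxOf h2]
  simp [h']

theorem pvNodes_pairwise (edges : List (Int × Int)) :
    (pvNbrs edges).keys.Pairwise (fun x y => pvK edges x < pvK edges y) := by
  have hk := (pvInv_nbrs edges).1
  rw [List.pairwise_iff_getElem]
  intro i j hi hj hij
  rw [pvK_idxOf edges _ (List.getElem_mem hi), pvK_idxOf edges _ (List.getElem_mem hj),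
    List.Nodup.idxOf_getElem hk i hi, List.Nodup.idxOf_getElem hk j hj]
  exact_mod_cast hij

theorem pvLst_pairwise (edges : List (Int × Int)) (c : Int) :
    (PySem.List.sorted (pvNbr edges c) (pvK edges) false).Pairwise
      (fun x y => pvK edges x < pvK edges y) := by
  obtain ⟨hk, hv, hs, hc⟩ := pvInv_nbrs edges
  apply pv_pairwise_strict (PySem.List.sorted_pairwise (pvNbr edges c) (pvK edges))
  · exact ((PySem.List.sorted_perm (pvNbr edges c) (pvK edges) false).nodup_iff).mpr (hv c)
  · intro x hx y hy
    rw [PySem.List.mem_sorted] at hx hy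
    exact pvK_inj edges x (hc c x hx).2 y (hc c y hy).2

-- for a canonically ordered pair, its multiplicity in pvAllKeys is the number of common neighbours
theorem pvCount_eq (edges : List (Int × Int)) (u v : Int) (huv : pvK edges u < pvK edges v) :
    (pvAllKeys edges).count (u, v)
    = (pvNbrs edges).keys.countP (fun c => decide (u ∈ pvNbr edges c) && decide (v ∈ pvNbr edges c)) := by
  obtain ⟨hk, hv, hs, hc⟩ := pvInv_nbrs edges
  have hvals : (pvNbrs edges).values = (pvNbrs edges).keys.map (pvNbr edges) :=
    PySem.Dict.values_eq_map_keys (pvNbrs edges) hk ([] : PySem.Set Int)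
  rw [pvAllKeys, List.count_flatMap, hvals, List.map_map]
  have hmapeq : (pvNbrs edges).keys.map
        ((List.count (u, v) ∘ fun ns => pvPairs (PySem.List.sorted ns (pvK edges) false)) ∘ pvNbr edges)
      = (pvNbrs edges).keys.map (fun c =>
          if (decide (u ∈ pvNbr edges c) && decide (v ∈ pvNbr edges c)) = true then 1 else 0) := by
    apply List.map_congr_left
    intro c hcm
    show (pvPairs (PySem.List.sorted (pvNbr edges c) (pvK edges) false)).count (u, v) = _
    rw [pv_pairs_count (pvLst_pairwise edges c) u v]
    simp only [PySem.List.mem_sorted]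
    by_cases h1 : u ∈ pvNbr edges c <;> by_cases h2 : v ∈ pvNbr edges c <;>
      simp [h1, h2, huv]
  rw [hmapeq, PySem.List.sum_map_ite_one_zero_nat]

-- A's intersection size equals the same count of common neighbours
theorem pvInter_eq (edges : List (Int × Int)) (u v : Int) :
    (PySem.Set.inter (pvNbr edges u) (pvNbr edges v)).length
    = (pvNbrs edges).keys.countP (fun c => decide (u ∈ pvNbr edges c) && decide (v ∈ pvNbr edges c)) := by
  obtain ⟨hk, hv, hs, hc⟩ := pvInv_nbrs edges
  show ((pvNbr edges u).filter (fun x => (pvNbr edges v).contains x)).length = _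
  rw [List.countP_eq_length_filter]
  apply List.Perm.length_eq
  have hndu : (pvNbr edges u).Nodup := hv u
  rw [List.perm_ext_iff_of_nodup (hndu.filter _) (hk.filter _)]
  intro c
  simp only [List.mem_filter, PySem.Set.contains, List.contains_iff_mem,
    Bool.and_eq_true, decide_eq_true_eq]
  constructor
  · rintro ⟨h1, h2⟩
    exact ⟨(hc u c h1).2, (hs u c).mp h1, (hs v c).mp h2⟩
  · rintro ⟨h1, h2, h3⟩
    exact ⟨(hs u c).mpr h2, (hs v c).mpr h3⟩

theorem pvA_eq (edges : List (Int × Int)) :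
    detect_pressure_pairs edges = (pvPairs (pvNbrs edges).keys).filter (pvQA edges) := by
  show (PySem.List.pyRange 0 ((pvNbrs edges).keys.length : Int) 1).foldl (fun results i =>
      (PySem.List.pyRange (i + 1) ((pvNbrs edges).keys.length : Int) 1).foldl (fun results j =>
        if edges.contains (PySem.List.pyGetD (pvNbrs edges).keys i 0, PySem.List.pyGetD (pvNbrs edges).keys j 0)
            || edges.contains (PySem.List.pyGetD (pvNbrs edges).keys j 0, PySem.List.pyGetD (pvNbrs edges).keys i 0)
        then results
        else if 2 ≤ (PySem.Set.inter ((pvNbrs edges).getD (PySem.List.pyGetD (pvNbrs edges).keys i 0) [])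
              ((pvNbrs edges).getD (PySem.List.pyGetD (pvNbrs edges).keys j 0) [])).length
          then results ++ [(PySem.List.pyGetD (pvNbrs edges).keys i 0, PySem.List.pyGetD (pvNbrs edges).keys j 0)]
          else results) results) []
    = _
  rw [pvDoubleLoop (pvNbrs edges).keys
    (f := fun results a b =>
      if edges.contains (a, b) || edges.contains (b, a) then results
      else if 2 ≤ (PySem.Set.inter ((pvNbrs edges).getD a []) ((pvNbrs edges).getD b [])).length
        then results ++ [(a, b)] else results) []]
  have hfun : (fun (results : List (Int × Int)) (p : Int × Int) =>
        if edges.contains (p.1, p.2) || edges.contains (p.2, p.1) then results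
        else if 2 ≤ (PySem.Set.inter ((pvNbrs edges).getD p.1 []) ((pvNbrs edges).getD p.2 [])).length
          then results ++ [(p.1, p.2)] else results)
      = fun results p => if pvQA edges p then results ++ [p] else results := by
    funext results p
    rcases p with ⟨x, y⟩
    simp only [pvQA, pvNbr]
    by_cases h1 : edges.contains (x, y) || edges.contains (y, x)
    · rw [if_pos h1]
      simp only [List.contains_iff_mem, Bool.or_eq_true] at h1
      simp
      intro ha hb
      tauto
    · rw [if_neg h1]
      simp only [List.contains_iff_mem, Bool.or_eq_true, not_or] at h1
      by_cases h2 : 2 ≤ (PySem.Set.inter ((pvNbrs edges).getD x []) ((pvNbrs edges).getD y [])).length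
      · rw [if_pos h2]
        simp [h2]
        exact h1
      · rw [if_neg h2]
        simp [h2]
  rw [hfun, PySem.List.foldl_append_if_eq_filter]
  simp

theorem pvB_eq (edges : List (Int × Int)) :
    detect_pressure_pairs_alt edges
    = PySem.List.sorted2 ((PySem.Set.ofList (pvAllKeys edges)).filter (pvQB edges))
        (fun p => pvK edges p.1) (fun p => pvK edges p.2) false := by
  simp only [detect_pressure_pairs_alt]
  rw [show (PySem.List.enumerate (pvNbrs edges).keys 0).foldl
      (fun (d : PySem.Dict Int Int) kv => d.insert kv.2 kv.1) PySem.Dict.empty = pvIdxD edges from rfl]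
  rw [show (fun (x : Int) => (pvIdxD edges).getD x 0) = pvK edges from rfl]
  rw [show (fun (p : Int × Int) => (pvIdxD edges).getD p.1 0) = (fun p => pvK edges p.1) from rfl,
      show (fun (p : Int × Int) => (pvIdxD edges).getD p.2 0) = (fun p => pvK edges p.2) from rfl]
  congr 1

  have hloop : (pvNbrs edges).values.foldl (fun cnt ns =>
          (PySem.List.pyRange 0 ((PySem.List.sorted ns (pvK edges) false).length : Int) 1).foldl (fun cnt i =>
            (PySem.List.pyRange (i + 1) ((PySem.List.sorted ns (pvK edges) false).length : Int) 1).foldl (fun cnt j =>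
              cnt.insert (PySem.List.pyGetD (PySem.List.sorted ns (pvK edges) false) i 0,
                  PySem.List.pyGetD (PySem.List.sorted ns (pvK edges) false) j 0)
                (cnt.getD (PySem.List.pyGetD (PySem.List.sorted ns (pvK edges) false) i 0,
                  PySem.List.pyGetD (PySem.List.sorted ns (pvK edges) false) j 0) 0 + 1)) cnt) cnt)
        PySem.Dict.empty
      = (pvAllKeys edges).foldl
          (fun (c : PySem.Dict (Int × Int) Int) p => c.insert p (c.getD p 0 + 1)) PySem.Dict.empty := by
    have hstep : (pvNbrs edges).values.foldl (fun cnt ns =>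
          (PySem.List.pyRange 0 ((PySem.List.sorted ns (pvK edges) false).length : Int) 1).foldl (fun cnt i =>
            (PySem.List.pyRange (i + 1) ((PySem.List.sorted ns (pvK edges) false).length : Int) 1).foldl (fun cnt j =>
              cnt.insert (PySem.List.pyGetD (PySem.List.sorted ns (pvK edges) false) i 0,
                  PySem.List.pyGetD (PySem.List.sorted ns (pvK edges) false) j 0)
                (cnt.getD (PySem.List.pyGetD (PySem.List.sorted ns (pvK edges) false) i 0,
                  PySem.List.pyGetD (PySem.List.sorted ns (pvK edges) false) j 0) 0 + 1)) cnt) cnt)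
        PySem.Dict.empty
        = (pvNbrs edges).values.foldl (fun cnt ns =>
            (pvPairs (PySem.List.sorted ns (pvK edges) false)).foldl
              (fun (c : PySem.Dict (Int × Int) Int) p => c.insert p (c.getD p 0 + 1)) cnt)
            PySem.Dict.empty := by
      apply PySem.List.foldl_congr_mem
      intro cnt ns _
      exact pvDoubleLoop (PySem.List.sorted ns (pvK edges) false)
        (fun acc u v => acc.insert (u, v) (acc.getD (u, v) 0 + 1)) cnt
    rw [hstep, pvAllKeys, ← List.foldl_flatMap]
  rw [hloop]
  have hnd : ((pvAllKeys edges).foldl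
      (fun (c : PySem.Dict (Int × Int) Int) p => c.insert p (c.getD p 0 + 1)) PySem.Dict.empty).keys.Nodup :=
    PySem.Dict.nodup_keys_foldl_insert _ _ _ PySem.Dict.nodup_keys_empty
  have hkeysC : ((pvAllKeys edges).foldl
      (fun (c : PySem.Dict (Int × Int) Int) p => c.insert p (c.getD p 0 + 1)) PySem.Dict.empty).keys
      = PySem.Set.ofList (pvAllKeys edges) := by
    rw [PySem.Dict.keys_foldl_insert]
    rfl
  have hgetC : ∀ p : Int × Int, ((pvAllKeys edges).foldl
      (fun (c : PySem.Dict (Int × Int) Int) p => c.insert p (c.getD p 0 + 1)) PySem.Dict.empty).getD p 0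
      = ((pvAllKeys edges).count p : Int) := by
    intro p
    rw [PySem.Dict.getD_foldl_insert_add_one]
    simp [PySem.Dict.getD_empty]
  rw [PySem.Dict.items_eq_map_keys _ hnd 0, List.filter_map, List.map_map, hkeysC]
  simp only [Function.comp_def]
  rw [List.map_id'']
  apply List.filter_congr
  intro p _
  rw [hgetC p]
  rfl
  intro x
  rfl

theorem pvAB (edges : List (Int × Int)) :
    detect_pressure_pairs edges = detect_pressure_pairs_alt edges := by
  obtain ⟨hk, hv, hs, hc⟩ := pvInv_nbrs edges
  rw [pvA_eq, pvB_eq, pv_sorted2_eq]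
  have hcanonA : ∀ p : Int × Int, p ∈ pvPairs (pvNbrs edges).keys ↔
      p.1 ∈ (pvNbrs edges).keys ∧ p.2 ∈ (pvNbrs edges).keys ∧ pvK edges p.1 < pvK edges p.2 := by
    intro p
    obtain ⟨u, v⟩ := p
    exact pv_mem_pairs_iff (pvNodes_pairwise edges) u v
  have hmemAll : ∀ p : Int × Int, p ∈ pvAllKeys edges →
      p.1 ∈ (pvNbrs edges).keys ∧ p.2 ∈ (pvNbrs edges).keys ∧ pvK edges p.1 < pvK edges p.2 := by
    intro p hp
    rw [pvAllKeys, List.mem_flatMap] at hp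
    obtain ⟨ns, hns, hpairs⟩ := hp
    rw [PySem.Dict.values_eq_map_keys (pvNbrs edges) hk ([] : PySem.Set Int), List.mem_map] at hns
    obtain ⟨c, hcmem, rfl⟩ := hns
    obtain ⟨u, v⟩ := p
    have hm := (pv_mem_pairs_iff (pvLst_pairwise edges c) u v).mp hpairs
    rw [PySem.List.mem_sorted, PySem.List.mem_sorted] at hm
    exact ⟨(hc c u hm.1).2, (hc c v hm.2.1).2, hm.2.2⟩
  have hQ : ∀ p : Int × Int, p.1 ∈ (pvNbrs edges).keys → p.2 ∈ (pvNbrs edges).keys →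
      pvK edges p.1 < pvK edges p.2 → (pvQA edges p = true ↔ pvQB edges p = true) := by
    intro p h1 h2 hlt
    unfold pvQA pvQB
    rw [pvInter_eq edges p.1 p.2, pvCount_eq edges p.1 p.2 hlt]
    simp only [Bool.and_eq_true, Bool.not_eq_true', Bool.or_eq_false_iff, decide_eq_true_eq]
    constructor
    · rintro ⟨⟨ha1, ha2⟩, hcnt⟩
      exact ⟨⟨by exact_mod_cast hcnt, ha1⟩, ha2⟩
    · rintro ⟨⟨hcnt, ha1⟩, ha2⟩
      exact ⟨⟨ha1, ha2⟩, by exact_mod_cast hcnt⟩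
  have hndA : ((pvPairs (pvNbrs edges).keys).filter (pvQA edges)).Nodup :=
    (pv_pairs_nodup (pvNodes_pairwise edges)).filter _
  have hndS : ((PySem.Set.ofList (pvAllKeys edges)).filter (pvQB edges)).Nodup :=
    (PySem.Set.nodup_ofList _).filter _
  have hperm : ((pvPairs (pvNbrs edges).keys).filter (pvQA edges)).Perm
      ((PySem.Set.ofList (pvAllKeys edges)).filter (pvQB edges)) := by
    rw [List.perm_ext_iff_of_nodup hndA hndS]
    intro p
    simp only [List.mem_filter, PySem.Set.mem_ofList]
    constructor
    · rintro ⟨hmem, hqa⟩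
      obtain ⟨h1, h2, hlt⟩ := (hcanonA p).mp hmem
      have hqb := (hQ p h1 h2 hlt).mp hqa
      refine ⟨?_, hqb⟩
      have hcnt : (2 : Int) ≤ ((pvAllKeys edges).count p : Int) := by
        unfold pvQB at hqb
        simp only [Bool.and_eq_true, decide_eq_true_eq] at hqb
        exact hqb.1.1
      apply List.count_pos_iff.mp
      omega
    · rintro ⟨hmem, hqb⟩
      obtain ⟨h1, h2, hlt⟩ := hmemAll p hmem
      exact ⟨(hcanonA p).mpr ⟨h1, h2, hlt⟩, (hQ p h1 h2 hlt).mpr hqb⟩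
  have hpw : ((pvPairs (pvNbrs edges).keys).filter (pvQA edges)).Pairwise
      (fun a b => toLex (pvK edges a.1, pvK edges a.2) < toLex (pvK edges b.1, pvK edges b.2)) := by
    have hpp := (pv_pairs_pairwise (pvNodes_pairwise edges)).filter (pvQA edges)
    exact hpp.imp (fun h => Prod.Lex.toLex_lt_toLex.mpr h)
  exact (PySem.List.sorted_eq_of_perm_of_pairwise_lt _ _ _ hperm hpw).symm

-- ===== VERDICT (by name: the statement is the Claim_ definition above) =====
theorem detect_pressure_pairs_spec : Claim_equal_detect_pressure_pairs := by
  intro edges _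
  unfold Spec_detect_pressure_pairs
  exact pvAB edges
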